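-- pv_equiv track=rewrite | github.com/Berdegeus/python_signature_manager | router/router.py | parse_port_candidates
-- ===== SOURCE A (Python) =====
-- from typing import Callable, List
--
-- def parse_port_candidates(raw: str) -> List[int]:
--     ports: List[int] = []
--     seen: set[int] = set()
--
--     for chunk in (piece.strip() for piece in raw.split(",") if piece.strip()):
--         if "-" in chunk:
--             start_str, end_str = chunk.split("-", 1)
--             start = _coerce_port(start_str)
--             end = _coerce_port(end_str)
--             if start > end:
--                 raise ValueError(f"invalid port range: {chunk}")
--             for port in range(start, end + 1):
--                 if port not in seen:
--                     ports.append(port)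
--                     seen.add(port)
--             continue
--
--         port = _coerce_port(chunk)
--         if port not in seen:
--             ports.append(port)
--             seen.add(port)
--
--     return ports
--
-- def _coerce_port(raw: str) -> int:
--     try:
--         value = int(raw)
--     except ValueError as exc:
--         raise ValueError(f"invalid port number: {raw}") from exc
--     if value <= 0 or value > 65535:
--         raise ValueError(f"invalid port number: {raw}")
--     return value
-- ===== SOURCE B (Python) =====
-- from typing import List
--
-- def parse_port_candidates(raw: str) -> List[int]:
--     all_ports: List[int] = []
--     for chunk in (piece.strip() for piece in raw.split(",") if piece.strip()):
--         all_ports.extend(_expand_chunk(chunk))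
--     return list(dict.fromkeys(all_ports))
--
-- def _expand_chunk(chunk: str) -> List[int]:
--     if "-" in chunk:
--         start_str, end_str = chunk.split("-", 1)
--         start = _coerce_port(start_str)
--         end = _coerce_port(end_str)
--         if start > end:
--             raise ValueError(f"invalid port range: {chunk}")
--         return list(range(start, end + 1))
--     return [_coerce_port(chunk)]
--
-- def _coerce_port(raw: str) -> int:
--     try:
--         value = int(raw)
--     except ValueError as exc:
--         raise ValueError(f"invalid port number: {raw}") from exc
--     if value <= 0 or value > 65535:
--         raise ValueError(f"invalid port number: {raw}")
--     return value
-- ===== Notes on version B (the rewrite author's own statement) =====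
-- stated objective: alternative
-- what changed: B expands every chunk into a flat list of ports via a helper and deduplicates once at the end with dict.fromkeys, replacing A's inline per-port seen-set membership branching inside the chunk loop.
import Mathlib
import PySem

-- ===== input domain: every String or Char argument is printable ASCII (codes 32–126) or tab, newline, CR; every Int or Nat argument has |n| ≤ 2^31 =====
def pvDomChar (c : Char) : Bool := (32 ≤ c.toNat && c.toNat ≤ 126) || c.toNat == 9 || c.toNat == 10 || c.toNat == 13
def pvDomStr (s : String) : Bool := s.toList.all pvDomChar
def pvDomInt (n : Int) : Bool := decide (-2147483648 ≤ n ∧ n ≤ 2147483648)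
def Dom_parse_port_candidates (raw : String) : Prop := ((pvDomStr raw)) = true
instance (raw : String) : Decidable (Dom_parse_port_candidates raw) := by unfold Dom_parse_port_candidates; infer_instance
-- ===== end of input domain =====

-- B replaces A's inline seen-set membership branching by an expand-every-chunk pass followed by one
-- dict.fromkeys dedup pass (alternative decomposition, same cost). Equivalence of return values on Pre_.

-- shared helper of both ports: _coerce_port (none = ValueError)
def pvCoerce? (s : String) : Option Int :=
  match PySem.Int.ofStr? s with
  | none => none
  | some v => if v ≤ 0 ∨ 65535 < v then none else some v

-- the stripped non-empty chunks of raw.split(",")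
def pvChunks (raw : String) : List String :=
  (((PySem.Str.split? raw ",").getD []).map PySem.Str.strip).filter (fun c => c ≠ "")

-- ===== PORT A =====
-- the 'if port not in seen: ports.append(port); seen.add(port)' body
def pvAIns (st : List Int × PySem.Set Int) (p : Int) : List Int × PySem.Set Int :=
  if PySem.Set.contains st.2 p then st else (st.1 ++ [p], PySem.Set.add st.2 p)

-- A's for-loop over the chunks, threading (ports, seen); none = ValueError raised
def pvALoop : List String → (List Int × PySem.Set Int) → Option (List Int × PySem.Set Int)
  | [], st => some st
  | chunk :: rest, st =>
    if PySem.Str.isIn "-" chunk then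
      match PySem.Str.splitMax? chunk "-" 1 with
      | some (startStr :: endStr :: _) =>
        match pvCoerce? startStr, pvCoerce? endStr with
        | some s, some e =>
          if s > e then none
          else pvALoop rest ((PySem.List.pyRange s (e + 1) 1).foldl pvAIns st)
        | _, _ => none
      | _ => none
    else
      match pvCoerce? chunk with
      | some p => pvALoop rest (pvAIns st p)
      | none => none

def parse_port_candidates (raw : String) : List Int :=
  ((pvALoop (pvChunks raw) ([], PySem.Set.empty)).map (·.1)).getD []

-- ===== PORT B =====
-- _expand_chunk: one chunk to its (possibly duplicated) port list; none = ValueError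
def pvExpand? (chunk : String) : Option (List Int) :=
  if PySem.Str.isIn "-" chunk then
    match PySem.Str.splitMax? chunk "-" 1 with
    | some (startStr :: endStr :: _) =>
      match pvCoerce? startStr, pvCoerce? endStr with
      | some s, some e => if s > e then none else some (PySem.List.pyRange s (e + 1) 1)
      | _, _ => none
    | _ => none
  else (pvCoerce? chunk).map (fun p => [p])

-- B's gathering loop: all_ports.extend(...) over the chunks
def pvGather : List String → Option (List Int)
  | [] => some []
  | chunk :: rest =>
    match pvExpand? chunk with
    | none => none
    | some e => (pvGather rest).map (fun l => e ++ l)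

def parse_port_candidates_alt (raw : String) : List Int :=
  ((pvGather (pvChunks raw)).map PySem.List.dedup).getD []

-- ===== PRECONDITION & SPEC =====
-- Pre_ excludes exactly the inputs on which A raises ValueError: a chunk that is not a valid
-- port number in 1..65535, or a range chunk whose ends are invalid or whose start exceeds its end.
def pvValidChunk (chunk : String) : Bool :=
  if PySem.Str.isIn "-" chunk then
    match PySem.Str.splitMax? chunk "-" 1 with
    | some (startStr :: endStr :: _) =>
      match pvCoerce? startStr, pvCoerce? endStr with
      | some s, some e => decide (s ≤ e)
      | _, _ => false
    | _ => false
  else (pvCoerce? chunk).isSome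

def Pre_parse_port_candidates (raw : String) : Prop :=
  ∀ c ∈ pvChunks raw, pvValidChunk c = true
instance (raw : String) : Decidable (Pre_parse_port_candidates raw) := by
  unfold Pre_parse_port_candidates; infer_instance

def pvWitness_parse_port_candidates : String := "80, 8000-8003,80"

def Spec_parse_port_candidates (raw : String) (out : List Int) : Prop := out = parse_port_candidates_alt raw
instance (raw : String) (out : List Int) : Decidable (Spec_parse_port_candidates raw out) := by unfold Spec_parse_port_candidates; infer_instance

-- ===== CLAIM (what is proved, stated in full; the proofs are below) =====
def Claim_equal_parse_port_candidates : Prop := ∀ (raw : String), Dom_parse_port_candidates raw → Pre_parse_port_candidates raw → Spec_parse_port_candidates raw (parse_port_candidates raw)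

-- ===== LEMMAS AND PROOFS =====

-- A's loop is B's gathering loop followed by the fold of the insert body over the gathered list
theorem pvALoop_eq_gather (cs : List String) (st : List Int × PySem.Set Int) :
    pvALoop cs st = (pvGather cs).map (fun l => l.foldl pvAIns st) := by
  induction cs generalizing st with
  | nil => rfl
  | cons c rest ih =>
    simp only [pvALoop, pvGather, pvExpand?]
    by_cases hin : PySem.Str.isIn "-" c = true
    · simp only [hin, if_true]
      cases h : PySem.Str.splitMax? c "-" 1 with
      | none => rfl
      | some parts =>
        match parts with
        | [] => rfl
        | [a] => rfl
        | a :: b :: t =>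
          cases ha : pvCoerce? a with
          | none => simp [ha]
          | some s =>
            cases hb : pvCoerce? b with
            | none => simp [ha, hb]
            | some e =>
              by_cases hle : s > e
              · simp [ha, hb, hle]
              · simp only [ha, hb, hle, if_false, ih]
                cases pvGather rest <;> simp [List.foldl_append]
    · simp only [hin, if_false, Bool.false_eq_true]
      cases hc : pvCoerce? c with
      | none => rfl
      | some p =>
        simp only [Option.map_some, ih]
        cases pvGather rest <;> simp

-- a valid chunk expands
theorem pvExpand?_isSome_of_valid (c : String) (h : pvValidChunk c = true) :
    ∃ e, pvExpand? c = some e := by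
  unfold pvValidChunk at h
  unfold pvExpand?
  by_cases hin : PySem.Str.isIn "-" c = true
  · simp only [hin, if_true] at h ⊢
    cases hs : PySem.Str.splitMax? c "-" 1 with
    | none => rw [hs] at h; exact absurd h (by simp)
    | some parts =>
      rw [hs] at h
      match parts with
      | [] => exact absurd h (by simp)
      | [a] => exact absurd h (by simp)
      | a :: b :: t =>
        cases ha : pvCoerce? a with
        | none => simp [ha] at h
        | some s =>
          cases hb : pvCoerce? b with
          | none => simp [ha, hb] at h
          | some e =>
            simp only [ha, hb, decide_eq_true_eq] at h
            refine ⟨PySem.List.pyRange s (e + 1) 1, ?_⟩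
            simp [ha, hb, not_lt.mpr h]
  · simp only [hin, if_false, Bool.false_eq_true] at h ⊢
    cases hc : pvCoerce? c <;> rw [hc] at h
    · exact absurd h (by simp)
    · exact ⟨_, rfl⟩

-- on all-valid chunks the gathering loop returns
theorem pvGather_isSome (cs : List String) (h : ∀ c ∈ cs, pvValidChunk c = true) :
    ∃ l, pvGather cs = some l := by
  induction cs with
  | nil => exact ⟨[], rfl⟩
  | cons c rest ih =>
    obtain ⟨e, he⟩ := pvExpand?_isSome_of_valid c (h c (by simp))
    obtain ⟨l, hl⟩ := ih (fun d hd => h d (by simp [hd]))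
    exact ⟨e ++ l, by simp [pvGather, he, hl]⟩

-- the seen-set fold on a duplicated-state pair is the set-update fold
theorem foldl_pvAIns_diag (xs : List Int) (s : List Int) :
    xs.foldl pvAIns (s, s) = (xs.foldl PySem.Set.add s, xs.foldl PySem.Set.add s) := by
  induction xs generalizing s with
  | nil => rfl
  | cons x xs ih =>
    simp only [List.foldl_cons]
    have : pvAIns (s, s) x = (PySem.Set.add s x, PySem.Set.add s x) := by
      unfold pvAIns PySem.Set.add
      split_ifs <;> rfl
    rw [this, ih]

-- ===== VERDICT (by name: the statement is the Claim_ definition above) =====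
theorem parse_port_candidates_spec : Claim_equal_parse_port_candidates := by
  intro raw _ hpre
  unfold Spec_parse_port_candidates parse_port_candidates parse_port_candidates_alt
  obtain ⟨l, hl⟩ := pvGather_isSome (pvChunks raw) hpre
  rw [pvALoop_eq_gather, hl]
  have : PySem.Set.empty (α := Int) = ([] : List Int) := rfl
  simp only [Option.map_some, Option.getD_some, this]
  rw [foldl_pvAIns_diag l []]
  simp [PySem.List.dedup_eq_ofList, PySem.Set.ofList_eq_foldl]
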